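-- pv_equiv track=rewrite | github.com/anna-chappelle/bracket-city | bracket.py | find_all_brackets_with_positions
-- ===== SOURCE A (Python) =====
-- def find_all_brackets_with_positions(s):
--     result = []
--     stack = []
--
--     for i, char in enumerate(s):
--         if char == '[':
--             stack.append(i)
--         elif char == ']':
--             if stack:
--                 start = stack.pop()
--                 result.append((s[start:i+1], start, i+1))
--
--     return result
-- ===== SOURCE B (Python) =====
-- def _match_open(s, i):
--     # backward scan from i-1 with a balance counter; returns the index of the
--     # '[' matching the ']' at i, or None if it is unmatched
--     depth = 1
--     j = i - 1
--     while j >= 0: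
--         c = s[j]
--         if c == ']':
--             depth += 1
--         elif c == '[':
--             depth -= 1
--             if depth == 0:
--                 return j
--         j -= 1
--     return None
--
-- def find_all_brackets_with_positions(s):
--     out = []
--     for i, ch in enumerate(s):
--         if ch == ']':
--             j = _match_open(s, i)
--             if j is not None:
--                 out.append((s[j:i+1], j, i+1))
--     return out
-- ===== Notes on version B (the rewrite author's own statement) =====
-- stated objective: alternative
-- what changed: Replaced the single left-to-right stack pass with, for each closing bracket encountered, a backward balance-counter scan that locates its matching opening bracket directly (no stack maintained).
import Mathlib
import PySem

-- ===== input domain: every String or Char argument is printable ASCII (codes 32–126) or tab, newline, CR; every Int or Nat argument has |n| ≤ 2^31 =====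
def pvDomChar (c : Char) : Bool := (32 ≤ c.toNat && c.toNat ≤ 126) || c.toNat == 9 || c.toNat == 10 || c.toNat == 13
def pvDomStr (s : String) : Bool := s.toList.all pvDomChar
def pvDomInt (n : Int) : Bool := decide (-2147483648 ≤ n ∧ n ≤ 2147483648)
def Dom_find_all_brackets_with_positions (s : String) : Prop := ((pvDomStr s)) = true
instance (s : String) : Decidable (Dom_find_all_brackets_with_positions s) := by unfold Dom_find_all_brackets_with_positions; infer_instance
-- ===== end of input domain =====

-- B replaces A's single stack pass by a per-closing-bracket backward balance-counter scan
-- (alternative decomposition, same return value; no speed claim).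

-- ===== PORT A =====
-- one iteration of A's for-loop over (result, stack)
def faStep (s : String) (st : List (String × Int × Int) × List Int) (p : Int × Char) :
    List (String × Int × Int) × List Int :=
  if p.2 = '[' then (st.1, st.2 ++ [p.1])
  else if p.2 = ']' then
    match st.2.getLast? with
    | some start =>
        (st.1 ++ [(PySem.Str.slice s (some start) (some (p.1 + 1)), start, p.1 + 1)],
         st.2.dropLast)
    | none => st
  else st

def find_all_brackets_with_positions (s : String) : List (String × Int × Int) :=
  ((PySem.List.enumerate s.toList 0).foldl (faStep s) ([], [])).1

-- ===== PORT B =====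
-- backward scan (port of _match_open's while-loop, as recursion over the
-- reversed enumerated prefix, i.e. positions i-1, i-2, …, 0 in that order)
def faMatchOpen : List (Int × Char) → Nat → Option Int
  | [], _ => none
  | p :: rest, depth =>
    if p.2 = ']' then faMatchOpen rest (depth + 1)
    else if p.2 = '[' then
      if depth = 1 then some p.1 else faMatchOpen rest (depth - 1)
    else faMatchOpen rest depth

-- what B's loop body appends for one enumerated character
def faEmit (s : String) (e : List (Int × Char)) (p : Int × Char) : List (String × Int × Int) :=
  if p.2 = ']' then
    match faMatchOpen ((e.take p.1.toNat).reverse) 1 with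
    | some j => [(PySem.Str.slice s (some j) (some (p.1 + 1)), j, p.1 + 1)]
    | none => []
  else []

def find_all_brackets_with_positions_alt (s : String) : List (String × Int × Int) :=
  let e := PySem.List.enumerate s.toList 0
  e.flatMap (faEmit s e)

-- ===== PRECONDITION & SPEC =====
def Spec_find_all_brackets_with_positions (s : String) (out : List (String × Int × Int)) : Prop := out = find_all_brackets_with_positions_alt s
instance (s : String) (out : List (String × Int × Int)) : Decidable (Spec_find_all_brackets_with_positions s out) := by unfold Spec_find_all_brackets_with_positions; infer_instance

-- ===== CLAIM (what is proved, stated in full; the proofs are below) =====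
def Claim_equal_find_all_brackets_with_positions : Prop := ∀ (s : String), Dom_find_all_brackets_with_positions s → Spec_find_all_brackets_with_positions s (find_all_brackets_with_positions s)

-- ===== LEMMAS AND PROOFS =====

lemma faGetLast?_eq {α : Type} (l : List α) : l.getLast? = l.reverse[0]? := by
  cases h : l.reverse with
  | nil => simp_all [List.reverse_eq_nil_iff]
  | cons a t =>
      have : l = (a :: t).reverse := by rw [← h, List.reverse_reverse]
      subst this
      simp

-- the loop invariant: after processing the first k characters,
-- A's result equals B's output on that prefix, and B's backward scan with
-- counter d+1 reads off entry d of A's reversed stack.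
lemma faInvariant (s : String) (k : Nat) (hk : k ≤ s.toList.length) :
    (((PySem.List.enumerate s.toList 0).take k).foldl (faStep s) ([], [])).1
      = ((PySem.List.enumerate s.toList 0).take k).flatMap
          (faEmit s (PySem.List.enumerate s.toList 0)) ∧
    ∀ d : Nat,
      faMatchOpen (((PySem.List.enumerate s.toList 0).take k).reverse) (d + 1)
        = (((PySem.List.enumerate s.toList 0).take k).foldl (faStep s) ([], [])).2.reverse[d]? := by
  induction k with
  | zero => simp [faMatchOpen]
  | succ k ih =>
      have hk' : k ≤ s.toList.length := Nat.le_of_succ_le hk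
      obtain ⟨ih1, ih2⟩ := ih hk'
      set e := PySem.List.enumerate s.toList 0 with he
      have hkl : k < s.toList.length := hk
      have hget? : e[k]? = some ((k : Int), s.toList[k]) := by
        rw [he, PySem.List.getElem?_enumerate, List.getElem?_eq_getElem hkl]
        simp
      have htake : e.take (k + 1) = e.take k ++ [((k : Int), s.toList[k])] := by
        rw [List.take_add_one, hget?]
        rfl
      have hfold : (e.take (k + 1)).foldl (faStep s) ([], [])
          = faStep s ((e.take k).foldl (faStep s) ([], [])) ((k : Int), s.toList[k]) := by
        rw [htake, List.foldl_append]
        rfl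
      set st := (e.take k).foldl (faStep s) ([], []) with hst
      have hEmitTake : ((((k : Int), s.toList[k]) : Int × Char)).1.toNat = k := by simp
      by_cases hopen : s.toList[k] = '['
      · -- '[' : push
        have hstep : faStep s st ((k : Int), s.toList[k]) = (st.1, st.2 ++ [(k : Int)]) := by
          simp [faStep, hopen]
        constructor
        · rw [hfold, hstep, htake, List.flatMap_append]
          simp [faEmit, hopen, ih1]
        · intro d
          rw [hfold, hstep, htake]
          simp only [List.reverse_append, List.reverse_cons, List.reverse_nil,
            List.nil_append, List.singleton_append]
          cases d with
          | zero => simp [faMatchOpen, hopen]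
          | succ d' =>
              have hm : faMatchOpen (((k : Int), s.toList[k]) :: (e.take k).reverse) (d' + 1 + 1)
                  = faMatchOpen ((e.take k).reverse) (d' + 1) := by
                simp [faMatchOpen, hopen]
              rw [hm, ih2 d', List.getElem?_cons_succ]
      · by_cases hclose : s.toList[k] = ']'
        · -- ']' : pop if possible
          cases hlast : st.2.getLast? with
          | none =>
              have hnil : st.2 = [] := by
                cases h2 : st.2 with
                | nil => rfl
                | cons a t => rw [h2] at hlast; simp [List.getLast?_eq_some_getLast] at hlast
              have hstep : faStep s st ((k : Int), s.toList[k]) = st := by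
                simp [faStep, hclose, hlast]
              constructor
              · rw [hfold, hstep, htake, List.flatMap_append, ih1]
                have hemit : faEmit s e ((k : Int), s.toList[k]) = [] := by
                  unfold faEmit
                  rw [if_pos hclose]
                  have hm0 : faMatchOpen ((e.take (((k : Int), s.toList[k])).1.toNat).reverse) 1
                      = none := by
                    rw [hEmitTake, ih2 0, hnil]
                    rfl
                  rw [hm0]
                simp [hemit]
              · intro d
                rw [hfold, hstep, htake]
                simp only [List.reverse_append, List.reverse_cons, List.reverse_nil,
                  List.nil_append, List.singleton_append]
                have hm : faMatchOpen (((k : Int), s.toList[k]) :: (e.take k).reverse) (d + 1)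
                    = faMatchOpen ((e.take k).reverse) (d + 1 + 1) := by
                  simp [faMatchOpen, hclose]
                rw [hm, ih2 (d + 1), hnil]
                simp
          | some start =>
              have hstep : faStep s st ((k : Int), s.toList[k])
                  = (st.1 ++ [(PySem.Str.slice s (some start) (some ((k : Int) + 1)), start,
                        (k : Int) + 1)],
                     st.2.dropLast) := by
                simp [faStep, hclose, hlast]
              constructor
              · rw [hfold, hstep, htake, List.flatMap_append, ih1]
                have hemit : faEmit s e ((k : Int), s.toList[k])
                    = [(PySem.Str.slice s (some start) (some ((k : Int) + 1)), start,
                        (k : Int) + 1)] := by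
                  unfold faEmit
                  rw [if_pos hclose]
                  have hm0 : faMatchOpen ((e.take (((k : Int), s.toList[k])).1.toNat).reverse) 1
                      = some start := by
                    rw [hEmitTake, ih2 0, ← faGetLast?_eq, hlast]
                  rw [hm0]
                simp [hemit]
              · intro d
                rw [hfold, hstep, htake]
                simp only [List.reverse_append, List.reverse_cons, List.reverse_nil,
                  List.nil_append, List.singleton_append]
                have hm : faMatchOpen (((k : Int), s.toList[k]) :: (e.take k).reverse) (d + 1)
                    = faMatchOpen ((e.take k).reverse) (d + 1 + 1) := by
                  simp [faMatchOpen, hclose]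
                rw [hm, ih2 (d + 1), ← List.tail_reverse, List.getElem?_tail]
        · -- other char: skip
          have hstep : faStep s st ((k : Int), s.toList[k]) = st := by
            simp [faStep, hopen, hclose]
          constructor
          · rw [hfold, hstep, htake, List.flatMap_append, ih1]
            simp [faEmit, hclose]
          · intro d
            rw [hfold, hstep, htake]
            simp only [List.reverse_append, List.reverse_cons, List.reverse_nil,
              List.nil_append, List.singleton_append]
            have hm : faMatchOpen (((k : Int), s.toList[k]) :: (e.take k).reverse) (d + 1)
                = faMatchOpen ((e.take k).reverse) (d + 1) := by
              simp [faMatchOpen, hopen, hclose]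
            rw [hm, ih2 d]

-- ===== VERDICT (by name: the statement is the Claim_ definition above) =====
theorem find_all_brackets_with_positions_spec : Claim_equal_find_all_brackets_with_positions := by
  intro s _
  unfold Spec_find_all_brackets_with_positions
  unfold find_all_brackets_with_positions find_all_brackets_with_positions_alt
  have h := (faInvariant s s.toList.length (le_refl _)).1
  have hlen : (PySem.List.enumerate s.toList 0).length = s.toList.length := by
    rw [PySem.List.length_enumerate]
  rw [← hlen, List.take_length] at h
  exact h
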